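-- pv_equiv track=rewrite | github.com/Kausiukas/capstone_project | tests/performance_tests.py | generate_code_by_size
-- ===== SOURCE A (Python) =====
-- from typing import Dict, List, Any
--
-- def generate_code_by_size(size_kb: int) -> List[str]:
--     """Generate Python code of specified size"""
--     lines = []
--     lines_per_kb = 50  # Approximate lines per KB
--
--     total_lines = size_kb * lines_per_kb
--
--     for i in range(total_lines):
--         if i % 10 == 0:
--             lines.append(f'def function_{i}():')
--             lines.append(f'    """Function {i} for performance testing"""')
--             lines.append(f'    result = {i} * 2')
--             lines.append(f'    return result')
--         else:
--             lines.append(f'    # Line {i} for size generation')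
--
--     return lines
-- ===== SOURCE B (Python) =====
-- def generate_code_by_size(size_kb):
--     """Generate Python code of specified size"""
--     blocks = size_kb * 50 // 10
--     return [line
--             for b in range(blocks)
--             for line in (f'def function_{b * 10}():',
--                          f'    """Function {b * 10} for performance testing"""',
--                          f'    result = {b * 10} * 2',
--                          f'    return result',
--                          f'    # Line {b * 10 + 1} for size generation',
--                          f'    # Line {b * 10 + 2} for size generation',
--                          f'    # Line {b * 10 + 3} for size generation',
--                          f'    # Line {b * 10 + 4} for size generation',
--                          f'    # Line {b * 10 + 5} for size generation',
--                          f'    # Line {b * 10 + 6} for size generation',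
--                          f'    # Line {b * 10 + 7} for size generation',
--                          f'    # Line {b * 10 + 8} for size generation',
--                          f'    # Line {b * 10 + 9} for size generation')]
-- ===== Notes on version B (the rewrite author's own statement) =====
-- stated objective: alternative
-- what changed: Replaces the imperative per-line append loop with its modulo branch by a branch-free flattening comprehension over block indices, each block emitted as one fully unrolled literal tuple (the function stub followed by its nine comment lines).
import Mathlib
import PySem

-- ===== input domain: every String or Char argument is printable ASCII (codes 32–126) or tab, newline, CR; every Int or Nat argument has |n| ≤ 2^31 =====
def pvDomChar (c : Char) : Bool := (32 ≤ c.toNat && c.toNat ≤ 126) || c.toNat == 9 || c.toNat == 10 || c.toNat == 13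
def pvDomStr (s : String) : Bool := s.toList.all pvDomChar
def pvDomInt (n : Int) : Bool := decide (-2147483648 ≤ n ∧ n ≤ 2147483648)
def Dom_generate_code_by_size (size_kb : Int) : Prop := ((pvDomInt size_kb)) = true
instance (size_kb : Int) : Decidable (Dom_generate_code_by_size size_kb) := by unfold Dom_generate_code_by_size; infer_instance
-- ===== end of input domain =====

-- B replaces A's imperative per-line append loop with its modulo branch by a branch-free flattening over block indices, each block a fully unrolled literal list (alternative decomposition, same cost).


-- ===== PORT A =====
-- A-side helper: the body of A's loop; the accumulator is an Array so that each
-- `lines.append(...)` is an O(1) push, exactly Python's list-append cost.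
def pvStepA (lines : Array String) (i : Int) : Array String :=
  if PySem.Int.mod i 10 == 0 then
    ((((lines.push ("def function_" ++ PySem.Int.toStr i ++ "():")).push
        ("    \"\"\"Function " ++ PySem.Int.toStr i ++ " for performance testing\"\"\"")).push
        ("    result = " ++ PySem.Int.toStr i ++ " * 2")).push
        ("    return result"))
  else
    lines.push ("    # Line " ++ PySem.Int.toStr i ++ " for size generation")

def generate_code_by_size (size_kb : Int) : List String :=
  let lines_per_kb : Int := 50
  let total_lines := size_kb * lines_per_kb
  ((PySem.List.pyRange 0 total_lines 1).foldl pvStepA #[]).toList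

-- ===== PORT B =====
def generate_code_by_size_alt (size_kb : Int) : List String :=
  let blocks := PySem.Int.floordiv (size_kb * 50) 10
  (PySem.List.pyRange 0 blocks 1).flatMap (fun b =>
    ["def function_" ++ PySem.Int.toStr (b * 10) ++ "():",
     "    \"\"\"Function " ++ PySem.Int.toStr (b * 10) ++ " for performance testing\"\"\"",
     "    result = " ++ PySem.Int.toStr (b * 10) ++ " * 2",
     "    return result",
     "    # Line " ++ PySem.Int.toStr (b * 10 + 1) ++ " for size generation",
     "    # Line " ++ PySem.Int.toStr (b * 10 + 2) ++ " for size generation",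
     "    # Line " ++ PySem.Int.toStr (b * 10 + 3) ++ " for size generation",
     "    # Line " ++ PySem.Int.toStr (b * 10 + 4) ++ " for size generation",
     "    # Line " ++ PySem.Int.toStr (b * 10 + 5) ++ " for size generation",
     "    # Line " ++ PySem.Int.toStr (b * 10 + 6) ++ " for size generation",
     "    # Line " ++ PySem.Int.toStr (b * 10 + 7) ++ " for size generation",
     "    # Line " ++ PySem.Int.toStr (b * 10 + 8) ++ " for size generation",
     "    # Line " ++ PySem.Int.toStr (b * 10 + 9) ++ " for size generation"])

-- ===== PRECONDITION & SPEC =====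
def Spec_generate_code_by_size (size_kb : Int) (out : List String) : Prop := out = generate_code_by_size_alt size_kb
instance (size_kb : Int) (out : List String) : Decidable (Spec_generate_code_by_size size_kb out) := by unfold Spec_generate_code_by_size; infer_instance

-- ===== CLAIM (what is proved, stated in full; the proofs are below) =====
def Claim_equal_generate_code_by_size : Prop := ∀ (size_kb : Int), Dom_generate_code_by_size size_kb → Spec_generate_code_by_size size_kb (generate_code_by_size size_kb)

-- ===== LEMMAS AND PROOFS =====

-- the per-index contribution of A's loop
def pvLineA (i : Int) : List String :=
  if PySem.Int.mod i 10 == 0 then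
    ["def function_" ++ PySem.Int.toStr i ++ "():",
     "    \"\"\"Function " ++ PySem.Int.toStr i ++ " for performance testing\"\"\"",
     "    result = " ++ PySem.Int.toStr i ++ " * 2",
     "    return result"]
  else
    ["    # Line " ++ PySem.Int.toStr i ++ " for size generation"]

-- the per-block contribution of B's flattening
def pvBlock (b : Int) : List String :=
  ["def function_" ++ PySem.Int.toStr (b * 10) ++ "():",
   "    \"\"\"Function " ++ PySem.Int.toStr (b * 10) ++ " for performance testing\"\"\"",
   "    result = " ++ PySem.Int.toStr (b * 10) ++ " * 2",
   "    return result",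
   "    # Line " ++ PySem.Int.toStr (b * 10 + 1) ++ " for size generation",
   "    # Line " ++ PySem.Int.toStr (b * 10 + 2) ++ " for size generation",
   "    # Line " ++ PySem.Int.toStr (b * 10 + 3) ++ " for size generation",
   "    # Line " ++ PySem.Int.toStr (b * 10 + 4) ++ " for size generation",
   "    # Line " ++ PySem.Int.toStr (b * 10 + 5) ++ " for size generation",
   "    # Line " ++ PySem.Int.toStr (b * 10 + 6) ++ " for size generation",
   "    # Line " ++ PySem.Int.toStr (b * 10 + 7) ++ " for size generation",
   "    # Line " ++ PySem.Int.toStr (b * 10 + 8) ++ " for size generation",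
   "    # Line " ++ PySem.Int.toStr (b * 10 + 9) ++ " for size generation"]

-- A's Array loop, read back as a list, is the list-append loop over pvLineA
theorem pvStepA_toList (xs : List Int) (acc : Array String) :
    ((xs.foldl pvStepA acc)).toList = xs.foldl (fun l i => l ++ pvLineA i) acc.toList := by
  induction xs generalizing acc with
  | nil => rfl
  | cons x xs ih =>
    rw [List.foldl_cons, List.foldl_cons, ih]
    congr 1
    simp only [pvStepA, pvLineA]
    split <;> simp

theorem pvA_flatMap (k : Int) :
    generate_code_by_size k = (PySem.List.pyRange 0 (k * 50) 1).flatMap pvLineA := by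
  unfold generate_code_by_size
  rw [pvStepA_toList]
  exact PySem.List.foldl_append_eq_flatMap pvLineA _ []

theorem pvB_flatMap (k : Int) :
    generate_code_by_size_alt k =
      (PySem.List.pyRange 0 (PySem.Int.floordiv (k * 50) 10) 1).flatMap pvBlock := rfl

-- one ten-line block of A's output is exactly one element of B's flattening
theorem pvBlock_eq (b : Int) :
    (PySem.List.pyRange (10 * b) (10 * b + 10) 1).flatMap pvLineA = pvBlock b := by
  rw [PySem.List.pyRange_one]
  have h10 : ((10 * b + 10) - 10 * b).toNat = 10 := by omega
  rw [h10]
  have hr : List.range 10 = [0,1,2,3,4,5,6,7,8,9] := by decide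
  have hz : PySem.Int.mod (10 * b) 10 = 0 := by
    rw [PySem.Int.mod_eq_zero_iff_dvd]; exact ⟨b, rfl⟩
  have hnz : ∀ j : Int, 1 ≤ j → j ≤ 9 → ¬ PySem.Int.mod (10 * b + j) 10 = 0 := by
    intro j h1 h9 h
    rw [PySem.Int.mod_eq_zero_iff_dvd] at h
    omega
  simp only [hr, List.map, pvBlock, List.flatMap, pvLineA]
  norm_num [hz, hnz 1 (by norm_num) (by norm_num), hnz 2 (by norm_num) (by norm_num),
    hnz 3 (by norm_num) (by norm_num), hnz 4 (by norm_num) (by norm_num),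
    hnz 5 (by norm_num) (by norm_num), hnz 6 (by norm_num) (by norm_num),
    hnz 7 (by norm_num) (by norm_num), hnz 8 (by norm_num) (by norm_num),
    hnz 9 (by norm_num) (by norm_num), mul_comm]

theorem pvMain (n : Nat) :
    (PySem.List.pyRange 0 (10 * (n : Int)) 1).flatMap pvLineA =
      (PySem.List.pyRange 0 (n : Int) 1).flatMap pvBlock := by
  induction n with
  | zero => simp [PySem.List.pyRange_one_eq_nil]
  | succ n ih =>
    have hA : PySem.List.pyRange 0 (10 * ((n + 1 : Nat) : Int)) 1 =
        PySem.List.pyRange 0 (10 * (n : Int)) 1 ++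
        PySem.List.pyRange (10 * (n : Int)) (10 * (n : Int) + 10) 1 := by
      rw [show (10 * ((n + 1 : Nat) : Int)) = 10 * (n : Int) + 10 by push_cast; ring]
      exact PySem.List.pyRange_one_append 0 (10 * (n : Int)) (10 * (n : Int) + 10)
        (by positivity) (by omega)
    have hB : PySem.List.pyRange 0 ((n + 1 : Nat) : Int) 1 =
        PySem.List.pyRange 0 (n : Int) 1 ++ [(n : Int)] := by
      rw [show ((n + 1 : Nat) : Int) = (n : Int) + 1 by push_cast; ring]
      exact PySem.List.pyRange_one_succ_right (Int.natCast_nonneg n)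
    rw [hA, hB, List.flatMap_append, List.flatMap_append, ih]
    simp [pvBlock_eq (n : Int)]

theorem pvFloordiv (k : Int) : PySem.Int.floordiv (k * 50) 10 = k * 5 := by
  rw [PySem.Int.floordiv_eq_iff_of_pos (by norm_num)]
  omega

-- ===== VERDICT (by name: the statement is the Claim_ definition above) =====
theorem generate_code_by_size_spec : Claim_equal_generate_code_by_size := by
  intro k _
  unfold Spec_generate_code_by_size
  rw [pvA_flatMap, pvB_flatMap, pvFloordiv]
  by_cases hk : k ≤ 0
  · rw [PySem.List.pyRange_one_eq_nil (by omega), PySem.List.pyRange_one_eq_nil (by omega)]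
    rfl
  · have h5 : (k * 5 : Int) = (((k * 5).toNat : Nat) : Int) := by omega
    have h50 : (k * 50 : Int) = 10 * (((k * 5).toNat : Nat) : Int) := by omega
    rw [h50, h5]
    exact pvMain (k * 5).toNat
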